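-- pv_equiv track=rewrite | github.com/bird-six/seckill_shop | utils/current_slot.py | get_current_slot
-- ===== SOURCE A (Python) =====
-- def get_current_slot(current_hour):
--     time_slots = [8, 10, 12, 14, 16, 18, 20, 22]
--
--     # 1. 0:00-8:00 → 次日8点场
--     if 0 <= current_hour < 8:
--         return 8
--
--     # 2. 22:00-24:00 → 22点场
--     if 22 <= current_hour < 24:
--         return 22
--
--     # 3. 8:00-22:00 → 匹配对应的场次（8-10点→8，10-12→10...20-22→20）
--     for i in range(7):  # 只遍历前7个场次（8-20点），因为22点已单独处理
--         start = time_slots[i]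
--         end = time_slots[i + 1]
--         if start <= current_hour < end:
--             return start
--
--     # 理论上不会走到这里，兜底返回8点场
--     return 8
-- ===== SOURCE B (Python) =====
-- def get_current_slot(current_hour):
--     if 8 <= current_hour < 22:
--         return 8 + 2 * int((current_hour - 8) // 2)
--     if 22 <= current_hour < 24:
--         return 22
--     return 8
-- ===== Notes on version B (the rewrite author's own statement) =====
-- stated objective: simpler
-- what changed: Replaces the seven-iteration scan over adjacent time-slot pairs with a closed-form floor-division formula on the daytime range; the guards for the two night ranges stay.
import Mathlib
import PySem

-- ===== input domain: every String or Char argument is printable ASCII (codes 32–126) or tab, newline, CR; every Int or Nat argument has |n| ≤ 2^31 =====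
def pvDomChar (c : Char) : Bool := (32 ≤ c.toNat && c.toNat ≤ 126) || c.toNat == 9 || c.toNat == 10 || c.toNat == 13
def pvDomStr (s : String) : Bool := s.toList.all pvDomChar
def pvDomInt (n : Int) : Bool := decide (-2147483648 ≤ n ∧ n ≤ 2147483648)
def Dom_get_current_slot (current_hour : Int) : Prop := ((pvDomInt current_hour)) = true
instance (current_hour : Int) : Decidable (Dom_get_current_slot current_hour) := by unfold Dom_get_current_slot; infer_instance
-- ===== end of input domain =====

-- B replaces A's 7-step scan over adjacent slot pairs with a closed-form floor-division formula (simpler).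


-- ===== PORT A =====
def tsA : List Int := [8, 10, 12, 14, 16, 18, 20, 22]

-- the 'for i in range(7)' loop with its early return; [] = loop fell through → trailing 'return 8'
def slotLoopA (h : Int) : List Int → Int
  | [] => 8
  | i :: rest =>
    let start := (PySem.List.pyGet? tsA i).getD 0
    let stop := (PySem.List.pyGet? tsA (i + 1)).getD 0
    if start ≤ h ∧ h < stop then start else slotLoopA h rest

def get_current_slot (current_hour : Int) : Int :=
  if 0 ≤ current_hour ∧ current_hour < 8 then 8
  else if 22 ≤ current_hour ∧ current_hour < 24 then 22
  else slotLoopA current_hour (PySem.List.pyRange 0 7 1)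

-- ===== PORT B =====
def get_current_slot_alt (current_hour : Int) : Int :=
  if 8 ≤ current_hour ∧ current_hour < 22 then
    8 + 2 * PySem.Int.floordiv (current_hour - 8) 2
  else if 22 ≤ current_hour ∧ current_hour < 24 then 22
  else 8

-- ===== PRECONDITION & SPEC =====
def Spec_get_current_slot (current_hour : Int) (out : Int) : Prop := out = get_current_slot_alt current_hour
instance (current_hour : Int) (out : Int) : Decidable (Spec_get_current_slot current_hour out) := by unfold Spec_get_current_slot; infer_instance

-- ===== CLAIM (what is proved, stated in full; the proofs are below) =====
def Claim_equal_get_current_slot : Prop := ∀ (current_hour : Int), Dom_get_current_slot current_hour → Spec_get_current_slot current_hour (get_current_slot current_hour)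

-- ===== LEMMAS AND PROOFS =====
lemma pyRange07 : PySem.List.pyRange 0 7 1 = [0, 1, 2, 3, 4, 5, 6] := by decide

-- the loop falls through to 8 when the hour is outside every scanned interval
lemma slotLoopA_miss (h : Int) (hh : h < 8 ∨ 22 ≤ h) :
    slotLoopA h (PySem.List.pyRange 0 7 1) = 8 := by
  rw [pyRange07]
  norm_num [slotLoopA, tsA, PySem.List.pyGet?, PySem.List.pyIdx?, show Int.toNat 0 = 0 from rfl, show Int.toNat 1 = 1 from rfl, show Int.toNat 2 = 2 from rfl, show Int.toNat 3 = 3 from rfl, show Int.toNat 4 = 4 from rfl, show Int.toNat 5 = 5 from rfl, show Int.toNat 6 = 6 from rfl, show Int.toNat 7 = 7 from rfl]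
  split_ifs <;> omega

-- ===== VERDICT (by name: the statement is the Claim_ definition above) =====
theorem get_current_slot_spec : Claim_equal_get_current_slot := by
  intro h _
  show get_current_slot h = get_current_slot_alt h
  by_cases hin : 8 ≤ h ∧ h < 22
  · obtain ⟨h1, h2⟩ := hin
    interval_cases h <;> decide
  · unfold get_current_slot get_current_slot_alt
    rw [slotLoopA_miss h (by omega)]
    split_ifs <;> omega
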